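-- pv_equiv track=rewrite | github.com/BashCtl/python-edabit | very_hard/the_secret_base_of_words.py | word_to_decimal
-- ===== SOURCE A (Python) =====
-- def word_to_decimal(word):
--     word = word.lower()
--     nums = [ord(l) - ord("a") + 1 for l in word]
--     max_num = max(nums)
--     base = max_num + 10
--     representative = list(map(lambda a: a + 9, nums))
--     length = len(representative)
--     return sum([n*base**(length-i-1)for i,n in enumerate(representative)])
-- ===== SOURCE B (Python) =====
-- def word_to_decimal(word):
--     word = word.lower()
--     base = max(ord(c) - ord("a") + 1 for c in word) + 10
--     res = 0
--     for c in word: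
--         res = res * base + (ord(c) - ord("a") + 10)
--     return res
-- ===== Notes on version B (the rewrite author's own statement) =====
-- stated objective: faster
-- what changed: Replaces the list-of-powers construction (base**(length-i-1) recomputed per digit) with a single Horner accumulation res = res*base + digit over the word.
import Mathlib
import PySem

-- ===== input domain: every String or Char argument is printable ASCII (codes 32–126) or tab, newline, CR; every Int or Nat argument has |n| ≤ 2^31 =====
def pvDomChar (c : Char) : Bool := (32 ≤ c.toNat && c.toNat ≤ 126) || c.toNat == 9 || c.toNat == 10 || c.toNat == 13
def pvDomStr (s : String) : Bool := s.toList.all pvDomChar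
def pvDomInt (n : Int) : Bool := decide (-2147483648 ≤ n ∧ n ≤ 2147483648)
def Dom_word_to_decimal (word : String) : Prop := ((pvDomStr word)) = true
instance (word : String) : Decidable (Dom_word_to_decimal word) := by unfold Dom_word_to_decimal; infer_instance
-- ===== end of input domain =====

-- B replaces the per-digit power computation with a single Horner pass (res = res*base + digit); faster.


-- ===== PORT A =====
def word_to_decimal (word : String) : Int :=
  let w := PySem.Chars.lower word.toList
  let nums := w.map (fun l => (l.toNat : Int) - 97 + 1)
  -- Python's max raises on an empty list; Pre_ excludes the empty word, so the .getD 0 never fires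
  let max_num := (PySem.List.max? nums (fun x => x)).getD 0
  let base := max_num + 10
  let representative := nums.map (fun a => a + 9)
  let length := (representative.length : Int)
  -- the exponent length-i-1 is nonnegative for every enumerate index i, so .toNat is exact here
  ((PySem.List.enumerate representative 0).map (fun p => p.2 * base ^ (length - p.1 - 1).toNat)).sum

-- ===== PORT B =====
def word_to_decimal_alt (word : String) : Int :=
  let w := PySem.Chars.lower word.toList
  -- Python's max raises on an empty generator; Pre_ excludes the empty word, so the .getD 0 never fires
  let base := (PySem.List.max? (w.map (fun c => (c.toNat : Int) - 97 + 1)) (fun x => x)).getD 0 + 10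
  w.foldl (fun res c => res * base + ((c.toNat : Int) - 97 + 10)) 0

-- ===== PRECONDITION & SPEC =====
-- Pre_ excludes only the empty string, on which Python's max() (in both A and B) raises ValueError.
def Pre_word_to_decimal (word : String) : Prop := word.toList ≠ []
instance (word : String) : Decidable (Pre_word_to_decimal word) := by unfold Pre_word_to_decimal; infer_instance
def pvWitness_word_to_decimal : String := "aZ"

def Spec_word_to_decimal (word : String) (out : Int) : Prop := out = word_to_decimal_alt word
instance (word : String) (out : Int) : Decidable (Spec_word_to_decimal word out) := by unfold Spec_word_to_decimal; infer_instance

-- ===== CLAIM (what is proved, stated in full; the proofs are below) =====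
def Claim_equal_word_to_decimal : Prop := ∀ (word : String), Dom_word_to_decimal word → Pre_word_to_decimal word → Spec_word_to_decimal word (word_to_decimal word)

-- ===== LEMMAS AND PROOFS =====

-- Horner's rule: the positional sum A computes equals B's left fold, for any start index s
theorem horner_aux (b : Int) (t : List Int) : ∀ (s a : Int),
    t.foldl (fun r d => r * b + d) a
      = a * b ^ t.length
        + ((PySem.List.enumerate t s).map
            (fun p => p.2 * b ^ ((s + (t.length : Int)) - p.1 - 1).toNat)).sum := by
  induction t with
  | nil => intro s a; simp [PySem.List.enumerate]
  | cons d t ih =>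
    intro s a
    rw [PySem.List.enumerate_cons]
    simp only [List.foldl_cons, List.map_cons, List.sum_cons, List.length_cons]
    have h1 : (s + ((t.length : Int) + 1)) - s - 1 = (t.length : Int) := by ring
    have h2 : ∀ p : Int × Int,
        ((s + ((t.length : Int) + 1)) - p.1 - 1) = (((s + 1) + (t.length : Int)) - p.1 - 1) := by
      intro p; ring
    have h3 : ((PySem.List.enumerate t (s + 1)).map
          (fun p => p.2 * b ^ ((s + ((t.length : Int) + 1)) - p.1 - 1).toNat))
        = ((PySem.List.enumerate t (s + 1)).map
          (fun p => p.2 * b ^ (((s + 1) + (t.length : Int)) - p.1 - 1).toNat)) := by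
      apply List.map_congr_left; intro p _; rw [h2 p]
    push_cast
    rw [show ((t.length : Int) + 1) = (t.length : Int) + 1 from rfl, h3]
    rw [ih (s + 1) (a * b + d)]
    have h4 : ((s + ((t.length : Int) + 1)) - s - 1).toNat = t.length := by
      rw [h1]; exact Int.toNat_natCast t.length
    rw [h4]
    ring

theorem word_to_decimal_eq_alt (word : String) :
    word_to_decimal word = word_to_decimal_alt word := by
  unfold word_to_decimal word_to_decimal_alt
  set w := PySem.Chars.lower word.toList with hw
  simp only []
  -- rewrite B's fold over chars as a fold over A's `representative` digit list
  have hfold : w.foldl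
      (fun res c => res * ((PySem.List.max? (w.map (fun c => (c.toNat : Int) - 97 + 1)) (fun x => x)).getD 0 + 10)
        + ((c.toNat : Int) - 97 + 10)) 0
      = ((w.map (fun l => (l.toNat : Int) - 97 + 1)).map (fun a => a + 9)).foldl
        (fun r d => r * ((PySem.List.max? (w.map (fun c => (c.toNat : Int) - 97 + 1)) (fun x => x)).getD 0 + 10) + d) 0 := by
    rw [List.map_map, List.foldl_map]
    congr 1
    funext r c
    simp only [Function.comp]
    ring
  rw [hfold,
    horner_aux ((PySem.List.max? (w.map (fun c => (c.toNat : Int) - 97 + 1)) (fun x => x)).getD 0 + 10)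
      ((w.map (fun l => (l.toNat : Int) - 97 + 1)).map (fun a => a + 9)) 0 0]
  simp

-- ===== VERDICT (by name: the statement is the Claim_ definition above) =====
theorem word_to_decimal_spec : Claim_equal_word_to_decimal := by
  intro word _ _
  exact word_to_decimal_eq_alt word
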